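-- pv_equiv track=rewrite | github.com/polkwagner/law-faculty-skills | law-mcq-generator/validate_mcq.py | check_question_coverage
-- ===== SOURCE A (Python) =====
-- def check_question_coverage(questions, answers):
--     """Check 7: Every exam question has a corresponding answer key entry."""
--     issues = []
--     for qnum in sorted(questions.keys()):
--         if qnum not in answers:
--             issues.append(f"Q{qnum}: missing from answer key")
--     # Also check for extra answers
--     for qnum in sorted(answers.keys()):
--         if qnum not in questions:
--             issues.append(f"Q{qnum}: in answer key but not in exam")
--     return issues
-- ===== SOURCE B (Python) =====
-- def check_question_coverage(questions, answers):
--     """Check 7: Every exam question has a corresponding answer key entry."""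
--     qs = sorted(questions.keys())
--     ans = sorted(answers.keys())
--     missing, extra = [], []
--     i = j = 0
--     while i < len(qs) and j < len(ans):
--         if qs[i] < ans[j]:
--             missing.append(f"Q{qs[i]}: missing from answer key")
--             i += 1
--         elif ans[j] < qs[i]:
--             extra.append(f"Q{ans[j]}: in answer key but not in exam")
--             j += 1
--         else:
--             i += 1
--             j += 1
--     for k in range(i, len(qs)):
--         missing.append(f"Q{qs[k]}: missing from answer key")
--     for k in range(j, len(ans)):
--         extra.append(f"Q{ans[k]}: in answer key but not in exam")
--     return missing + extra
-- ===== Notes on version B (the rewrite author's own statement) =====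
-- stated objective: alternative
-- what changed: Replaces A's two loops that test each sorted key's membership in the other dict with a single two-pointer merge of the two sorted key lists that classifies each key as missing, extra or matched in one synchronized pass, with no membership test at all.
import Mathlib
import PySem

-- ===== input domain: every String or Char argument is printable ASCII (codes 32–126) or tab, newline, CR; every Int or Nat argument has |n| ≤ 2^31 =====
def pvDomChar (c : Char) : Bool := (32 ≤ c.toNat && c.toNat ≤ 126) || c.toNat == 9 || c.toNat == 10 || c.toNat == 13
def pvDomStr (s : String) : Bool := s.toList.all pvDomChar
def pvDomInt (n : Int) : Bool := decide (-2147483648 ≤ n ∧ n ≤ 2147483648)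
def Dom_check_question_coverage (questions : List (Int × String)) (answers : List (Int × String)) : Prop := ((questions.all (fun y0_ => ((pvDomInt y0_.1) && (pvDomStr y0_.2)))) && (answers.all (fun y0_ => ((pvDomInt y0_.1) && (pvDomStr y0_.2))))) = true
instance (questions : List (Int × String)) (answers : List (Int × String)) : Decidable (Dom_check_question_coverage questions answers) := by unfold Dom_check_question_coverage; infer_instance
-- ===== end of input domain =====

-- B replaces A's two membership-test scans by a single two-pointer merge of the two sorted
-- key lists, classifying each key as missing/extra/matched in one synchronized pass. Objective: alternative.

-- ===== PORT A =====
def check_question_coverage (questions : List (Int × String)) (answers : List (Int × String)) : List String :=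
  -- issues = []; for qnum in sorted(questions.keys()): if qnum not in answers: issues.append(...)
  let issues : List String :=
    (PySem.List.sorted (questions.map Prod.fst) (fun x => x) false).foldl
      (fun acc qnum =>
        if !((answers.map Prod.fst).contains qnum) then
          acc ++ ["Q" ++ PySem.Int.toStr qnum ++ ": missing from answer key"]
        else acc) []
  -- for qnum in sorted(answers.keys()): if qnum not in questions: issues.append(...)
  (PySem.List.sorted (answers.map Prod.fst) (fun x => x) false).foldl
    (fun acc qnum =>
      if !((questions.map Prod.fst).contains qnum) then
        acc ++ ["Q" ++ PySem.Int.toStr qnum ++ ": in answer key but not in exam"]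
      else acc) issues

-- ===== PORT B =====
-- the two message formatters of Source B
def pvMsgMissing (q : Int) : String := "Q" ++ PySem.Int.toStr q ++ ": missing from answer key"
def pvMsgExtra (q : Int) : String := "Q" ++ PySem.Int.toStr q ++ ": in answer key but not in exam"

-- Source B's while-loop over the two sorted key lists: the suffixes qs[i:], ans[j:] are the two
-- list arguments; the trailing for-loops are the base cases.
def pvMergeScan : List Int → List Int → List String × List String
  | [], ans => ([], ans.map pvMsgExtra)
  | q :: qs, [] => ((q :: qs).map pvMsgMissing, [])
  | q :: qs, a :: ans =>
    if q < a then
      (pvMsgMissing q :: (pvMergeScan qs (a :: ans)).1, (pvMergeScan qs (a :: ans)).2)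
    else if a < q then
      ((pvMergeScan (q :: qs) ans).1, pvMsgExtra a :: (pvMergeScan (q :: qs) ans).2)
    else
      pvMergeScan qs ans
termination_by qs ans => qs.length + ans.length

def check_question_coverage_alt (questions : List (Int × String)) (answers : List (Int × String)) : List String :=
  let qs := PySem.List.sorted (questions.map Prod.fst) (fun x => x) false
  let ans := PySem.List.sorted (answers.map Prod.fst) (fun x => x) false
  let r := pvMergeScan qs ans
  r.1 ++ r.2

-- ===== PRECONDITION & SPEC =====
-- Pre_ states the Python dict invariant: the association lists model dicts, whose keys are
-- unique; a duplicate-keyed list is not the image of any Python dict input.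
def Pre_check_question_coverage (questions : List (Int × String)) (answers : List (Int × String)) : Prop :=
  (questions.map Prod.fst).Nodup ∧ (answers.map Prod.fst).Nodup
instance (questions : List (Int × String)) (answers : List (Int × String)) : Decidable (Pre_check_question_coverage questions answers) := by unfold Pre_check_question_coverage; infer_instance

def pvWitness_check_question_coverage : (List (Int × String)) × (List (Int × String)) :=
  ([(1, "A"), (2, "B")], [(2, "C"), (3, "D")])

def Spec_check_question_coverage (questions : List (Int × String)) (answers : List (Int × String)) (out : List String) : Prop := out = check_question_coverage_alt questions answers
instance (questions : List (Int × String)) (answers : List (Int × String)) (out : List String) : Decidable (Spec_check_question_coverage questions answers out) := by unfold Spec_check_question_coverage; infer_instance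

-- ===== CLAIM (what is proved, stated in full; the proofs are below) =====
def Claim_equal_check_question_coverage : Prop := ∀ (questions : List (Int × String)) (answers : List (Int × String)), Dom_check_question_coverage questions answers → Pre_check_question_coverage questions answers → Spec_check_question_coverage questions answers (check_question_coverage questions answers)

-- ===== LEMMAS AND PROOFS =====

-- the merge of two strictly increasing lists is the pair of one-sided filtered maps
theorem pvMergeScan_eq (qs ans : List Int) (hq : qs.Pairwise (· < ·)) (ha : ans.Pairwise (· < ·)) :
    pvMergeScan qs ans =
      ((qs.filter (fun x => !(ans.contains x))).map pvMsgMissing,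
       (ans.filter (fun y => !(qs.contains y))).map pvMsgExtra) := by
  fun_induction pvMergeScan qs ans with
  | case1 ans => simp [List.filter]
  | case2 q qs => simp [List.filter]
  | case3 q qs a ans hlt ih =>
    have hq' := (List.pairwise_cons.mp hq).2
    obtain ⟨hahead, ha'⟩ := List.pairwise_cons.mp ha
    rw [ih hq' ha]
    have hqnans : q ∉ ans := fun h => absurd (hahead q h) (by omega)
    have e2 : List.filter (fun y => !decide (y ∈ q :: qs)) ans
        = List.filter (fun y => !decide (y ∈ qs)) ans :=
      List.filter_congr (fun y hy => by
        have := hahead y hy; simp [List.mem_cons, show ¬y = q by omega])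
    simp only [List.filter_cons, List.contains_eq_mem, Bool.not_eq_eq_eq_not, Bool.not_true,
      decide_eq_false_iff_not, Prod.mk.injEq]
    constructor
    · simp [show ¬q = a by omega, hqnans]
    · rw [e2]
      by_cases h : a ∈ qs <;> simp [h, show ¬a = q by omega]
  | case4 q qs a ans hlt hgt ih =>
    have ha' := (List.pairwise_cons.mp ha).2
    obtain ⟨hqhead, hq'⟩ := List.pairwise_cons.mp hq
    rw [ih hq ha']
    have hanqs : a ∉ qs := fun h => absurd (hqhead a h) (by omega)
    have e1 : List.filter (fun x => !decide (x ∈ a :: ans)) qs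
        = List.filter (fun x => !decide (x ∈ ans)) qs :=
      List.filter_congr (fun x hx => by
        have := hqhead x hx; simp [List.mem_cons, show ¬x = a by omega])
    simp only [List.filter_cons, List.contains_eq_mem, Bool.not_eq_eq_eq_not, Bool.not_true,
      decide_eq_false_iff_not, Prod.mk.injEq]
    constructor
    · rw [e1]
      by_cases h : q ∈ ans <;> simp [h, show ¬q = a by omega]
    · simp [show ¬a = q by omega, hanqs]
  | case5 q qs a ans hlt hgt ih =>
    have heq : q = a := by omega
    subst heq
    obtain ⟨hqhead, hq'⟩ := List.pairwise_cons.mp hq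
    obtain ⟨hahead, ha'⟩ := List.pairwise_cons.mp ha
    rw [ih hq' ha']
    have e1 : List.filter (fun x => !decide (x ∈ q :: ans)) qs
        = List.filter (fun x => !decide (x ∈ ans)) qs :=
      List.filter_congr (fun x hx => by
        have := hqhead x hx; simp [List.mem_cons, show ¬x = q by omega])
    have e2 : List.filter (fun y => !decide (y ∈ q :: qs)) ans
        = List.filter (fun y => !decide (y ∈ qs)) ans :=
      List.filter_congr (fun y hy => by
        have := hahead y hy; simp [List.mem_cons, show ¬y = q by omega])
    simp only [List.filter_cons, List.contains_eq_mem, Bool.not_eq_eq_eq_not, Bool.not_true,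
      decide_eq_false_iff_not, Prod.mk.injEq]
    rw [e1, e2]
    simp

-- sorted of a nodup list is strictly increasing
theorem pvSortedStrict (xs : List Int) (h : xs.Nodup) :
    (PySem.List.sorted xs (fun x => x) false).Pairwise (· < ·) := by
  have hle := PySem.List.sorted_pairwise xs (fun x : Int => x)
  have hnd : (PySem.List.sorted xs (fun x => x) false).Nodup :=
    (PySem.List.sorted_perm xs (fun x => x) false).nodup_iff.mpr h
  have := hle.and (List.Pairwise.imp (fun h => h) hnd)
  exact this.imp (fun ⟨h1, h2⟩ => lt_of_le_of_ne h1 h2)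

-- membership in sorted = membership in the original, lifted to the contains-test
theorem pvContainsSorted (xs : List Int) (q : Int) :
    (PySem.List.sorted xs (fun x => x) false).contains q = xs.contains q := by
  simp [List.contains_eq_mem, PySem.List.mem_sorted]

theorem check_question_coverage_spec : Claim_equal_check_question_coverage := by
  intro questions answers _hdom hpre
  obtain ⟨hq, ha⟩ := hpre
  unfold Spec_check_question_coverage check_question_coverage check_question_coverage_alt
  simp only []
  rw [PySem.List.foldl_append_if, PySem.List.foldl_append_if,
      pvMergeScan_eq _ _ (pvSortedStrict _ hq) (pvSortedStrict _ ha)]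
  have h1 : ∀ x ∈ PySem.List.sorted (questions.map Prod.fst) (fun x => x) false,
      (!(answers.map Prod.fst).contains x)
        = (!(PySem.List.sorted (answers.map Prod.fst) (fun x => x) false).contains x) := by
    intro x _; rw [pvContainsSorted]
  have h2 : ∀ y ∈ PySem.List.sorted (answers.map Prod.fst) (fun x => x) false,
      (!(questions.map Prod.fst).contains y)
        = (!(PySem.List.sorted (questions.map Prod.fst) (fun x => x) false).contains y) := by
    intro y _; rw [pvContainsSorted]
  rw [List.filter_congr h1, List.filter_congr h2]
  rfl
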